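-- pv_equiv track=rewrite | github.com/yangt8/31 | lab9/lab9.py | tally_days_worked
-- ===== SOURCE A (Python) =====
-- def tally_days_worked(L:list) -> dict:
--     """ Returns dict where every key is a name of an employee and the value is the number of days worked for a week"""
--     workers = {}
--     for n in L:
--         if n== "Bob":
--             workers[n] = L.count("Bob")
--         if n == "Kyle":
--             workers[n] = L.count("Kyle")
--         if n == "Larry":
--             workers[n] = L.count("Larry")
--         if n == "Brenda":
--             workers[n] = L.count("Brenda")
--         if n == "Samantha":
--             workers[n] = L.count("Samantha")
--         if n == "Jane":
--             workers[n] = L.count("Jane")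
--     return workers
-- ===== SOURCE B (Python) =====
-- NAMES = {"Bob", "Kyle", "Larry", "Brenda", "Samantha", "Jane"}
--
-- def tally_days_worked(L: list) -> dict:
--     """Returns dict where every key is a name of an employee and the value is the number of days worked for a week"""
--     workers = {}
--     for n in L:
--         if n in NAMES:
--             workers[n] = workers.get(n, 0) + 1
--     return workers
-- ===== Notes on version B (the rewrite author's own statement) =====
-- stated objective: alternative
-- what changed: B counts incrementally in a single pass (workers[n] = workers.get(n,0)+1 for n in the fixed set of known names) instead of A's per-element rescans of the whole list via L.count inside six separate if-branches.
import Mathlib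
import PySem

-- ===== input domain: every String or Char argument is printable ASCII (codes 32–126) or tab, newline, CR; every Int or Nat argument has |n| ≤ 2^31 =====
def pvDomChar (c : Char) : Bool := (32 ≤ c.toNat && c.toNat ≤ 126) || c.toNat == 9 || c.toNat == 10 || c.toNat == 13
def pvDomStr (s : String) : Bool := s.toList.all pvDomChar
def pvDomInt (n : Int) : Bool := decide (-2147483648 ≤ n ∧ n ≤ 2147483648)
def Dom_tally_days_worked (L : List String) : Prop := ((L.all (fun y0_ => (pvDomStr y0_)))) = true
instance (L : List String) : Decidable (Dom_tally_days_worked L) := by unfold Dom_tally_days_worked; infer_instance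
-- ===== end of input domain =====

-- B replaces A's per-element full-list rescans (L.count inside six if-branches) by a single
-- incremental counting pass over L, filtered by the fixed set of six known names.

-- ===== PORT A =====
def tally_days_worked (L : List String) : List (String × Int) :=
  (L.foldl (fun (workers : PySem.Dict String Int) n =>
      let workers := if n == "Bob" then workers.insert n ((PySem.List.count L "Bob" : Nat) : Int) else workers
      let workers := if n == "Kyle" then workers.insert n ((PySem.List.count L "Kyle" : Nat) : Int) else workers
      let workers := if n == "Larry" then workers.insert n ((PySem.List.count L "Larry" : Nat) : Int) else workers
      let workers := if n == "Brenda" then workers.insert n ((PySem.List.count L "Brenda" : Nat) : Int) else workers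
      let workers := if n == "Samantha" then workers.insert n ((PySem.List.count L "Samantha" : Nat) : Int) else workers
      let workers := if n == "Jane" then workers.insert n ((PySem.List.count L "Jane" : Nat) : Int) else workers
      workers)
    PySem.Dict.empty).items

-- ===== PORT B =====
def pvNAMES : PySem.Set String := PySem.Set.ofList ["Bob", "Kyle", "Larry", "Brenda", "Samantha", "Jane"]

def tally_days_worked_alt (L : List String) : List (String × Int) :=
  (L.foldl (fun (workers : PySem.Dict String Int) n =>
      if PySem.Set.contains pvNAMES n then workers.insert n (workers.getD n 0 + 1) else workers)
    PySem.Dict.empty).items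

-- ===== PRECONDITION & SPEC =====
def Spec_tally_days_worked (L : List String) (out : List (String × Int)) : Prop := out = tally_days_worked_alt L
instance (L : List String) (out : List (String × Int)) : Decidable (Spec_tally_days_worked L out) := by unfold Spec_tally_days_worked; infer_instance

-- ===== CLAIM (what is proved, stated in full; the proofs are below) =====
def Claim_equal_tally_days_worked : Prop := ∀ (L : List String), Dom_tally_days_worked L → Spec_tally_days_worked L (tally_days_worked L)

-- ===== LEMMAS AND PROOFS =====

-- A's six exclusive if-branches are one guarded insert of the full-list count of n.
theorem tdw_stepA_eq (L : List String) (d : PySem.Dict String Int) (n : String) :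
    (let workers := if n == "Bob" then d.insert n ((PySem.List.count L "Bob" : Nat) : Int) else d
     let workers := if n == "Kyle" then workers.insert n ((PySem.List.count L "Kyle" : Nat) : Int) else workers
     let workers := if n == "Larry" then workers.insert n ((PySem.List.count L "Larry" : Nat) : Int) else workers
     let workers := if n == "Brenda" then workers.insert n ((PySem.List.count L "Brenda" : Nat) : Int) else workers
     let workers := if n == "Samantha" then workers.insert n ((PySem.List.count L "Samantha" : Nat) : Int) else workers
     let workers := if n == "Jane" then workers.insert n ((PySem.List.count L "Jane" : Nat) : Int) else workers
     workers)
    = if PySem.Set.contains pvNAMES n then d.insert n ((PySem.List.count L n : Nat) : Int) else d := by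
  by_cases h1 : n = "Bob" <;> by_cases h2 : n = "Kyle" <;> by_cases h3 : n = "Larry" <;>
    by_cases h4 : n = "Brenda" <;> by_cases h5 : n = "Samantha" <;> by_cases h6 : n = "Jane" <;>
    simp_all [pvNAMES, PySem.Set.contains]

-- a fold inserting a key-determined value: final lookup is g k for every k met
theorem tdw_getD_foldl_insert (g : String → Int) (M : List String) (d : PySem.Dict String Int) (k : String) :
    (M.foldl (fun d x => d.insert x (g x)) d).getD k 0 = if k ∈ M then g k else d.getD k 0 := by
  induction M generalizing d with
  | nil => simp
  | cons a M ih =>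
      simp only [List.foldl_cons, ih, PySem.Dict.getD_insert, List.mem_cons]
      by_cases hM : k ∈ M <;> by_cases ha : k = a <;> simp [hM, ha]

theorem tdw_items_foldl_insert (g : String → Int) (M : List String) :
    (M.foldl (fun (d : PySem.Dict String Int) x => d.insert x (g x)) PySem.Dict.empty).items
      = (PySem.Set.ofList M).map (fun k => (k, g k)) := by
  rw [PySem.Dict.items_eq_map_keys _
        (PySem.Dict.nodup_keys_foldl_insert M (fun _ x => g x) _ PySem.Dict.nodup_keys_empty) 0]
  rw [PySem.Dict.keys_foldl_insert]
  simp only [PySem.Dict.keys_empty]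
  refine List.map_eq_map_iff.mpr ?_
  intro k hk
  have hkM : k ∈ M := (PySem.Set.mem_ofList M k).mp (by simpa [PySem.Set.update, PySem.Set.ofList_eq_foldl] using hk)
  simp [tdw_getD_foldl_insert, hkM]

-- ===== VERDICT (by name: the statement is the Claim_ definition above) =====
theorem tally_days_worked_spec : Claim_equal_tally_days_worked := by
  intro L _
  show tally_days_worked L = tally_days_worked_alt L
  unfold tally_days_worked tally_days_worked_alt
  have hA : (fun (workers : PySem.Dict String Int) n =>
      let workers := if n == "Bob" then workers.insert n ((PySem.List.count L "Bob" : Nat) : Int) else workers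
      let workers := if n == "Kyle" then workers.insert n ((PySem.List.count L "Kyle" : Nat) : Int) else workers
      let workers := if n == "Larry" then workers.insert n ((PySem.List.count L "Larry" : Nat) : Int) else workers
      let workers := if n == "Brenda" then workers.insert n ((PySem.List.count L "Brenda" : Nat) : Int) else workers
      let workers := if n == "Samantha" then workers.insert n ((PySem.List.count L "Samantha" : Nat) : Int) else workers
      let workers := if n == "Jane" then workers.insert n ((PySem.List.count L "Jane" : Nat) : Int) else workers
      workers)
      = fun (d : PySem.Dict String Int) n =>
          if PySem.Set.contains pvNAMES n then d.insert n ((PySem.List.count L n : Nat) : Int) else d := by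
    funext d n; exact tdw_stepA_eq L d n
  rw [hA]
  rw [show (List.foldl (fun (d : PySem.Dict String Int) n =>
          if PySem.Set.contains pvNAMES n then d.insert n ((PySem.List.count L n : Nat) : Int) else d)
          PySem.Dict.empty L)
        = ((L.filter (fun n => PySem.Set.contains pvNAMES n)).foldl
            (fun (d : PySem.Dict String Int) n => d.insert n ((PySem.List.count L n : Nat) : Int))
            PySem.Dict.empty) from (List.foldl_filter ..).symm]
  rw [show (List.foldl (fun (d : PySem.Dict String Int) n =>
          if PySem.Set.contains pvNAMES n then d.insert n (d.getD n 0 + 1) else d)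
          PySem.Dict.empty L)
        = ((L.filter (fun n => PySem.Set.contains pvNAMES n)).foldl
            (fun (d : PySem.Dict String Int) n => d.insert n (d.getD n 0 + 1))
            PySem.Dict.empty) from (List.foldl_filter ..).symm]
  rw [PySem.Dict.foldl_insert_getD_add_one_eq_counter, PySem.Dict.items_counter,
      tdw_items_foldl_insert]
  refine List.map_eq_map_iff.mpr ?_
  intro k hk
  have hkF : k ∈ L.filter (fun n => PySem.Set.contains pvNAMES n) :=
    (PySem.Set.mem_ofList _ k).mp hk
  have hp : PySem.Set.contains pvNAMES k = true := (List.mem_filter.mp hkF).2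
  have hmem : k ∈ pvNAMES := by simpa [PySem.Set.contains] using hp
  simp only [PySem.List.count_eq]
  rw [List.count_filter (by simpa using hmem)]
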